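-- pv_equiv track=rewrite | github.com/chchaeun/study-algorithm | 기출/ssg/2022-2.py | solution
-- ===== SOURCE A (Python) =====
-- from typing import Final
-- from itertools import permutations
--
-- def compare_postfix(word, value):
--     if word[len(word) - len(value):] == value:
--         return True
--     return False
--
-- def compare_prefix(word, value):
--     if word[:len(value)] == value:
--         return True
--     return False
--
-- def search_pre(dictionary, value, length = None):
--     new_dic = []
--
--     for word in dictionary:
--         if length and len(word) != length:
--             continue
--         if compare_prefix(word, value):
--             new_dic.append(word)
--
--     return new_dic
--
-- def search_post(dictionary, value, length = None):
--     new_dic = []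
--
--     for word in dictionary:
--         if length and len(word) != length:
--             continue
--         if compare_postfix(word, value):
--             new_dic.append(word)
--
--     return new_dic
--
-- def search_length(dictionary, value):
--     WILD: Final = '@'
--
--     if value[-1] == WILD:
--         return search_pre(dictionary, value.split(WILD)[-1], len(value))
--     if value[0] == WILD:
--         return search_post(dictionary, value.split(WILD)[0], len(value))
--
-- def error(dictionary):
--     new_dic = dictionary
--
--     for element in list(permutations(dictionary, 2)):
--         new_dic.append(''.join(element))
--
--     return new_dic
--
-- def solution(dictionary, command):
--     POSTFIX: Final = "postfix"
--     PREFIX: Final = "prefix"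
--     LENGTH_MATCH: Final = "lengthMatch"
--
--     answer = error(dictionary)
--
--     for cmd in command:
--         order , value = cmd
--
--         if order == POSTFIX:
--             answer = search_post(answer, value)
--         if order == PREFIX:
--             answer = search_pre(answer, value)
--         if order == LENGTH_MATCH:
--             answer = search_length(answer, value)
--
--     return answer
-- ===== SOURCE B (Python) =====
-- from itertools import permutations
--
-- def solution(dictionary, command):
--     # Augment the input list in place (same observable mutation as A).
--     dictionary += [a + b for a, b in permutations(dictionary, 2)]
--     preds = []
--     for order, value in command:
--         if order == "prefix":
--             preds.append(lambda w, v=value: w.startswith(v))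
--         elif order == "postfix":
--             preds.append(lambda w, v=value: w.endswith(v))
--         elif order == "lengthMatch":
--             if value.endswith("@"):
--                 seg = value.split("@")[-1]
--                 preds.append(lambda w, n=len(value), s=seg: len(w) == n and w.startswith(s))
--             else:
--                 seg = value.split("@")[0]
--                 preds.append(lambda w, n=len(value), s=seg: len(w) == n and w.endswith(s))
--     return [w for w in dictionary if all(p(w) for p in preds)]
-- ===== Notes on version B (the rewrite author's own statement) =====
-- stated objective: simpler
-- what changed: A repeatedly rebuilds the whole candidate list with one scan per command (via search_pre/search_post/search_length); B compiles the commands into a list of predicates once and produces the answer in a single filtering pass over the augmented list.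
-- outside the precondition, e.g. on solution(['ab'], [('lengthMatch', 'ab')]): A returns None, B returns ['ab']; on solution(['ab'], [('lengthMatch', '')]): A raises IndexError, B returns []; on solution(['ab'], [('lengthMatch', 'ab'), ('prefix', 'a')]): A raises TypeError, B returns ['ab']
import Mathlib
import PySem

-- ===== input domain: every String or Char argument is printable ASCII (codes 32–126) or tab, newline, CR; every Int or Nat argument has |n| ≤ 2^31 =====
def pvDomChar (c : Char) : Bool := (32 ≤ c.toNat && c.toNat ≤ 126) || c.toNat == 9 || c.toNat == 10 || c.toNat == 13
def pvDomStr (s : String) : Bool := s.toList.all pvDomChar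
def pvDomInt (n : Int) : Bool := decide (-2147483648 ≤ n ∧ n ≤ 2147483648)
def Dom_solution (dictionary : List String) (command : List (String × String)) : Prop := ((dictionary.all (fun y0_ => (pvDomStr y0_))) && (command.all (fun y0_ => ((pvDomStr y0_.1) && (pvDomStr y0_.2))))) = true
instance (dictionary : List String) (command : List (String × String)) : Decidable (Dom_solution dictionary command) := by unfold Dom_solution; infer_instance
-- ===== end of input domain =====

-- B replaces A's sequence of list-rebuilding scans by ONE filtering pass over the augmented
-- list with a predicate list built from the commands (objective: simpler decomposition).
-- Note: A extends the input list `dictionary` in place (error()); B performs the same mutation.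
-- The equivalence proved here is about the return value.

-- ===== PORT A =====
def comparePostfix (word value : String) : Bool :=
  if PySem.Str.slice word (some (PySem.Str.len word - PySem.Str.len value)) none = value then true else false

def comparePrefix (word value : String) : Bool :=
  if PySem.Str.slice word none (some (PySem.Str.len value)) = value then true else false

def searchPre (dictionary : List String) (value : String) (length : Option Int) : List String :=
  dictionary.foldl (fun newDic word =>
    if ((match length with | none => false | some L => L != 0) && (PySem.Str.len word != length.getD 0)) then newDic
    else if comparePrefix word value then newDic ++ [word] else newDic) []

def searchPost (dictionary : List String) (value : String) (length : Option Int) : List String :=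
  dictionary.foldl (fun newDic word =>
    if ((match length with | none => false | some L => L != 0) && (PySem.Str.len word != length.getD 0)) then newDic
    else if comparePostfix word value then newDic ++ [word] else newDic) []

def searchLength (dictionary : List String) (value : String) : Option (List String) :=
  if PySem.Str.pyGet? value (-1) = some '@' then
    some (searchPre dictionary (PySem.List.pyGetD ((PySem.Str.split? value "@").getD []) (-1) "") (some (PySem.Str.len value)))
  else if PySem.Str.pyGet? value 0 = some '@' then
    some (searchPost dictionary (PySem.List.pyGetD ((PySem.Str.split? value "@").getD []) 0 "") (some (PySem.Str.len value)))
  else none  -- Python returns None here (and solution later crashes or returns None); excluded by Pre_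

def error (dictionary : List String) : List String :=
  (PySem.List.permutations dictionary 2).foldl
    (fun newDic element => newDic ++ [PySem.Str.join "" element]) dictionary

def solution (dictionary : List String) (command : List (String × String)) : List String :=
  command.foldl (fun answer cmd =>
    let a1 := if cmd.1 = "postfix" then searchPost answer cmd.2 none else answer
    let a2 := if cmd.1 = "prefix" then searchPre a1 cmd.2 none else a1
    -- `.getD []` stands where Python's answer would be None; such inputs are excluded by Pre_
    if cmd.1 = "lengthMatch" then (searchLength a2 cmd.2).getD [] else a2)
    (error dictionary)

-- ===== PORT B =====
def altPred (cmd : String × String) : Option (String → Bool) :=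
  if cmd.1 = "prefix" then some (fun w => PySem.Str.startswith w cmd.2)
  else if cmd.1 = "postfix" then some (fun w => PySem.Str.endswith w cmd.2)
  else if cmd.1 = "lengthMatch" then
    if PySem.Str.endswith cmd.2 "@" then
      some (fun w => (PySem.Str.len w == PySem.Str.len cmd.2) &&
        PySem.Str.startswith w (PySem.List.pyGetD ((PySem.Str.split? cmd.2 "@").getD []) (-1) ""))
    else
      some (fun w => (PySem.Str.len w == PySem.Str.len cmd.2) &&
        PySem.Str.endswith w (PySem.List.pyGetD ((PySem.Str.split? cmd.2 "@").getD []) 0 ""))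
  else none

def solution_alt (dictionary : List String) (command : List (String × String)) : List String :=
  let aug := dictionary ++ (PySem.List.permutations dictionary 2).map (PySem.Str.join "")
  let preds := command.filterMap altPred
  aug.filter (fun w => preds.all (fun p => p w))

-- ===== PRECONDITION & SPEC =====
-- Pre_ excludes inputs where some "lengthMatch" command carries a value that is empty or has
-- no '@' at either end: there Python's search_length returns None, so A raises (TypeError on
-- the next command) or returns None instead of a list.
def Pre_solution (dictionary : List String) (command : List (String × String)) : Prop :=
  ∀ c ∈ command, c.1 = "lengthMatch" →
    c.2 ≠ "" ∧ (PySem.Str.pyGet? c.2 0 = some '@' ∨ PySem.Str.pyGet? c.2 (-1) = some '@')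
instance (dictionary : List String) (command : List (String × String)) : Decidable (Pre_solution dictionary command) := by unfold Pre_solution; infer_instance

def pvWitness_solution : List String × (List (String × String)) :=
  (["ab", "c"], [("prefix", "a"), ("lengthMatch", "ab@")])

def Spec_solution (dictionary : List String) (command : List (String × String)) (out : List String) : Prop := out = solution_alt dictionary command
instance (dictionary : List String) (command : List (String × String)) (out : List String) : Decidable (Spec_solution dictionary command out) := by unfold Spec_solution; infer_instance

-- ===== CLAIM (what is proved, stated in full; the proofs are below) =====
def Claim_equal_solution : Prop := ∀ (dictionary : List String) (command : List (String × String)), Dom_solution dictionary command → Pre_solution dictionary command → Spec_solution dictionary command (solution dictionary command)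

-- ===== LEMMAS AND PROOFS =====

-- generic shape of A's search loops: skip-condition p, keep-condition q
theorem foldl_skip {α : Type} (p q : α → Bool) (l acc : List α) :
    l.foldl (fun a w => if p w then a else if q w then a ++ [w] else a) acc
      = acc ++ l.filter (fun w => !p w && q w) := by
  have hbody : (fun (a : List α) w => if p w then a else if q w then a ++ [w] else a)
      = fun a w => if (!p w && q w) then a ++ [w] else a := by
    funext a w; by_cases hp : p w <;> by_cases hq : q w <;> simp [hp, hq]
  rw [hbody]
  simpa using PySem.List.foldl_append_if (fun w => !p w && q w) id l acc

theorem comparePrefix_eq (w v : String) : comparePrefix w v = PySem.Str.startswith w v := by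
  unfold comparePrefix
  have key : (PySem.Str.slice w none (some (PySem.Str.len v)) = v) ↔ v.toList <+: w.toList := by
    rw [← String.toList_inj, PySem.Str.toList_slice, PySem.Chars.slice_eq_listSlice,
        PySem.Str.len_eq, PySem.List.slice_to w.toList (Int.natCast_nonneg _)]
    simp only [Int.toNat_natCast]
    rw [List.prefix_iff_eq_take]
    exact eq_comm
  by_cases h : v.toList <+: w.toList
  · rw [if_pos (key.mpr h)]; symm
    rw [PySem.Str.startswith_eq, PySem.Chars.startswith_iff]; exact h
  · rw [if_neg (fun hc => h (key.mp hc))]; symm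
    rw [Bool.eq_false_iff, Ne, PySem.Str.startswith_eq, PySem.Chars.startswith_iff]; exact h

theorem comparePostfix_eq (w v : String) : comparePostfix w v = PySem.Str.endswith w v := by
  unfold comparePostfix
  by_cases hle : v.toList.length ≤ w.toList.length
  · have hcast : PySem.Str.len w - PySem.Str.len v = ((w.toList.length - v.toList.length : Nat) : Int) := by
      rw [PySem.Str.len_eq, PySem.Str.len_eq]; omega
    have key : (PySem.Str.slice w (some (PySem.Str.len w - PySem.Str.len v)) none = v) ↔
        v.toList <:+ w.toList := by
      rw [← String.toList_inj, PySem.Str.toList_slice, PySem.Chars.slice_eq_listSlice, hcast,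
          PySem.List.slice_from_natCast, List.suffix_iff_eq_drop]
      exact eq_comm
    by_cases h : v.toList <:+ w.toList
    · rw [if_pos (key.mpr h)]; symm
      rw [PySem.Str.endswith_eq, PySem.Chars.endswith_iff]; exact h
    · rw [if_neg (fun hc => h (key.mp hc))]; symm
      rw [Bool.eq_false_iff, Ne, PySem.Str.endswith_eq, PySem.Chars.endswith_iff]; exact h
  · have hlen : (PySem.Str.slice w (some (PySem.Str.len w - PySem.Str.len v)) none).toList.length
        ≤ w.toList.length := by
      rw [PySem.Str.toList_slice, PySem.Chars.slice_eq_listSlice, PySem.List.slice_some_none,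
          List.length_drop]
      omega
    rw [if_neg]
    · symm
      rw [Bool.eq_false_iff, Ne, PySem.Str.endswith_eq, PySem.Chars.endswith_iff]
      intro h; have := h.length_le; omega
    · intro hc
      have : (PySem.Str.slice w (some (PySem.Str.len w - PySem.Str.len v)) none).toList.length
          = v.toList.length := by rw [hc]
      omega

-- A's test `value[-1] == '@'` agrees with B's `value.endswith("@")` on nonempty strings
theorem lastAt (v : String) (_hv : v ≠ "") :
    PySem.Str.endswith v "@" = true ↔ PySem.Str.pyGet? v (-1) = some '@' := by
  rw [PySem.Str.endswith_eq, PySem.Chars.endswith_iff, PySem.Str.pyGet?_eq,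
      PySem.Chars.pyGet?_eq_listPyGet?, PySem.List.pyGet?_neg_one]
  constructor
  · rintro ⟨t, ht⟩
    rw [← ht]
    exact List.getLast?_concat
  · intro h
    obtain ⟨t, ht⟩ := List.getLast?_eq_some_iff.mp h
    exact ⟨t, ht.symm⟩

theorem searchPost_none (d : List String) (v : String) :
    searchPost d v none = d.filter (fun w => PySem.Str.endswith w v) := by
  unfold searchPost
  rw [foldl_skip]
  simp [comparePostfix_eq]

theorem searchPre_none (d : List String) (v : String) :
    searchPre d v none = d.filter (fun w => PySem.Str.startswith w v) := by
  unfold searchPre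
  rw [foldl_skip]
  simp [comparePrefix_eq]

theorem searchPre_some (d : List String) (v : String) (n : Int) (hn : n ≠ 0) :
    searchPre d v (some n)
      = d.filter (fun w => (PySem.Str.len w == n) && PySem.Str.startswith w v) := by
  unfold searchPre
  rw [foldl_skip, List.nil_append]
  apply List.filter_congr
  intro w _
  rw [comparePrefix_eq]
  by_cases hw : (w.length : Int) = n
  · simp [hw, bne, beq_eq_false_iff_ne.mpr hn]
  · simp [bne, beq_eq_false_iff_ne.mpr hn, beq_eq_false_iff_ne.mpr hw]

theorem searchPost_some (d : List String) (v : String) (n : Int) (hn : n ≠ 0) :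
    searchPost d v (some n)
      = d.filter (fun w => (PySem.Str.len w == n) && PySem.Str.endswith w v) := by
  unfold searchPost
  rw [foldl_skip, List.nil_append]
  apply List.filter_congr
  intro w _
  rw [comparePostfix_eq]
  by_cases hw : (w.length : Int) = n
  · simp [hw, bne, beq_eq_false_iff_ne.mpr hn]
  · simp [bne, beq_eq_false_iff_ne.mpr hn, beq_eq_false_iff_ne.mpr hw]

theorem error_eq (d : List String) :
    error d = d ++ (PySem.List.permutations d 2).map (PySem.Str.join "") := by
  unfold error
  simpa using PySem.List.foldl_append_if (fun _ => true) (PySem.Str.join "") (PySem.List.permutations d 2) d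

-- one command of A's loop is one filter with B's predicate for that command
theorem step_filter (d : List String) (o v : String)
    (h : o = "lengthMatch" → v ≠ "" ∧
      (PySem.Str.pyGet? v 0 = some '@' ∨ PySem.Str.pyGet? v (-1) = some '@')) :
    (let a1 := if o = "postfix" then searchPost d v none else d
     let a2 := if o = "prefix" then searchPre a1 v none else a1
     if o = "lengthMatch" then (searchLength a2 v).getD [] else a2)
      = d.filter (fun w => ((altPred (o, v)).getD (fun _ => true)) w) := by
  by_cases h1 : o = "postfix"
  · subst h1
    simp only [if_neg (show ("postfix" : String) ≠ "prefix" by decide),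
      if_neg (show ("postfix" : String) ≠ "lengthMatch" by decide), if_pos (show ("postfix" : String) = "postfix" from rfl)]
    rw [searchPost_none]
    simp [altPred]
  · by_cases h2 : o = "prefix"
    · subst h2
      simp only [if_neg (show ("prefix" : String) ≠ "postfix" by decide),
        if_neg (show ("prefix" : String) ≠ "lengthMatch" by decide), if_pos (show ("prefix" : String) = "prefix" from rfl)]
      rw [searchPre_none]
      simp [altPred]
    · by_cases h3 : o = "lengthMatch"
      · subst h3
        simp only [if_neg (show ("lengthMatch" : String) ≠ "postfix" by decide),
          if_neg (show ("lengthMatch" : String) ≠ "prefix" by decide), if_pos (show ("lengthMatch" : String) = "lengthMatch" from rfl)]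
        obtain ⟨hv, hor⟩ := h rfl
        have hne : PySem.Str.len v ≠ 0 := by
          rw [PySem.Str.len_eq]
          intro hz
          apply hv
          rw [← String.toList_inj]
          simpa using hz
        by_cases hend : PySem.Str.pyGet? v (-1) = some '@'
        · have hendB : PySem.Str.endswith v "@" = true := (lastAt v hv).mpr hend
          have hendB' : PySem.Chars.endswith v.toList ['@'] = true := by
            simpa using hendB
          unfold searchLength
          rw [if_pos hend, Option.getD_some, searchPre_some _ _ _ hne]
          simp [altPred, hendB']
        · have hstart : PySem.Str.pyGet? v 0 = some '@' := hor.resolve_right hend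
          have hendB : PySem.Str.endswith v "@" = false := by
            rw [Bool.eq_false_iff, Ne, lastAt v hv]; exact hend
          have hendB' : PySem.Chars.endswith v.toList ['@'] = false := by
            simpa using hendB
          unfold searchLength
          rw [if_neg hend, if_pos hstart, Option.getD_some, searchPost_some _ _ _ hne]
          simp [altPred, h1, h2, hendB']
      · simp only [if_neg h1, if_neg h2, if_neg h3]
        simp [altPred, h1, h2, h3]

theorem loop_eq (cs : List (String × String)) :
    ∀ d : List String,
    (∀ c ∈ cs, c.1 = "lengthMatch" → c.2 ≠ "" ∧
      (PySem.Str.pyGet? c.2 0 = some '@' ∨ PySem.Str.pyGet? c.2 (-1) = some '@')) →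
    List.foldl (fun answer cmd =>
      let a1 := if cmd.1 = "postfix" then searchPost answer cmd.2 none else answer
      let a2 := if cmd.1 = "prefix" then searchPre a1 cmd.2 none else a1
      if cmd.1 = "lengthMatch" then (searchLength a2 cmd.2).getD [] else a2) d cs
      = d.filter (fun w => (cs.filterMap altPred).all (fun p => p w)) := by
  induction cs with
  | nil => intro d _; simp
  | cons c cs ih =>
    intro d hpre
    rcases c with ⟨o, v⟩
    rw [List.foldl_cons, step_filter d o v (hpre (o, v) (List.mem_cons_self) ),
      ih _ (fun c' hc' => hpre c' (List.mem_cons_of_mem _ hc')), List.filter_filter]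
    rcases hp : altPred (o, v) with _ | p
    · simp [hp]
    · rw [List.filterMap_cons_some hp]
      apply List.filter_congr
      intro w _
      simp [hp, List.all_cons, Bool.and_comm]

theorem solution_spec : Claim_equal_solution := by
  intro dictionary command _hdom hpre
  unfold Spec_solution solution solution_alt
  rw [error_eq, loop_eq command (dictionary ++ (PySem.List.permutations dictionary 2).map (PySem.Str.join "")) hpre]
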